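-- pv_equiv track=rewrite | github.com/evgenii-burov/nstu-v2 | Common/PythonProject/main.py | makeDiagonal
-- ===== SOURCE A (Python) =====
-- def makeDiagonal(n):
--     matrix = []
--     for i in range(n):
--         matrix.append([])
--         for j in range(n):
--             if j != i:
--                 matrix[i].append('0')
--             else:
--                 matrix[i].append(f'D{i + 1}{j + 1}')
--     return matrix
-- ===== SOURCE B (Python) =====
-- def makeDiagonal(n):
--     if n <= 0:
--         return []
--     flat = ['0'] * (n * n)
--     for i in range(n):
--         flat[i * (n + 1)] = f'D{i + 1}{i + 1}'
--     return [flat[r * n : (r + 1) * n] for r in range(n)]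
-- ===== Notes on version B (the rewrite author's own statement) =====
-- stated objective: alternative
-- what changed: Builds one flat 1-D buffer of n*n '0' cells, patches the n diagonal cells at stride n+1 by index arithmetic, and then chunks the buffer into rows by slicing, instead of A's row-by-row nested loop with a per-cell branch.
import Mathlib
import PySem

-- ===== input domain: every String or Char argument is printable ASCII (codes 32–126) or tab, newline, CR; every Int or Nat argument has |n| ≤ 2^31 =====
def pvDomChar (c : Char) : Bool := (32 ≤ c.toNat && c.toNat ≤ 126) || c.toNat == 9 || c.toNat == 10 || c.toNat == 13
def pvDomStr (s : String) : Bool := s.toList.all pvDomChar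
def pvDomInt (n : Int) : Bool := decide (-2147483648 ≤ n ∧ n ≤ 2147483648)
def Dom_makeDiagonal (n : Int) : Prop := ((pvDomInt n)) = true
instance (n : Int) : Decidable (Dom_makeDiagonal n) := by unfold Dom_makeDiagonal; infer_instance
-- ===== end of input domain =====

-- B builds one flat 1-D buffer of n*n '0' cells, patches the diagonal at stride n+1 by index
-- arithmetic, and chunks the buffer into rows by slicing (objective: alternative layout).

-- ===== PORT A =====
-- nested loop: append a fresh row, then append '0' or the diagonal string cell by cell
def makeDiagonal (n : Int) : List (List String) :=
  (PySem.List.pyRange 0 n 1).foldl (fun matrix i =>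
    matrix ++ [(PySem.List.pyRange 0 n 1).foldl (fun row j =>
      if j ≠ i then row ++ ["0"]
      else row ++ ["D" ++ PySem.Int.toStr (i + 1) ++ PySem.Int.toStr (j + 1)]) []]) []

-- ===== PORT B =====
-- no rows for n <= 0; else flat buffer of n*n cells, patch index i*(n+1), chunk rows by slicing
def makeDiagonal_alt (n : Int) : List (List String) :=
  if n ≤ 0 then [] else
  let flat := (PySem.List.pyRange 0 n 1).foldl (fun f i =>
    f.set (i * (n + 1)).toNat ("D" ++ PySem.Int.toStr (i + 1) ++ PySem.Int.toStr (i + 1)))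
    (List.replicate (n * n).toNat "0")
  (PySem.List.pyRange 0 n 1).map (fun r =>
    PySem.List.slice flat (some (r * n)) (some ((r + 1) * n)))

-- ===== PRECONDITION & SPEC =====
def Spec_makeDiagonal (n : Int) (out : List (List String)) : Prop := out = makeDiagonal_alt n
instance (n : Int) (out : List (List String)) : Decidable (Spec_makeDiagonal n out) := by unfold Spec_makeDiagonal; infer_instance

-- ===== CLAIM (what is proved, stated in full; the proofs are below) =====
def Claim_equal_makeDiagonal : Prop := ∀ (n : Int), Dom_makeDiagonal n → Spec_makeDiagonal n (makeDiagonal n)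

-- ===== LEMMAS AND PROOFS =====

-- the diagonal string of row k
def pvDiag (k : Nat) : String :=
  "D" ++ PySem.Int.toStr ((k : Int) + 1) ++ PySem.Int.toStr ((k : Int) + 1)

-- the canonical row k: N zeros with the diagonal cell patched
def pvRowP (N k : Nat) : List String := (List.replicate N "0").set k (pvDiag k)

lemma pvRowP_length (N k : Nat) : (pvRowP N k).length = N := by
  simp [pvRowP]

-- A's inner loop builds exactly the patched row
lemma a_inner (N i : Nat) :
    (List.range N).foldl (fun (row : List String) (j : Nat) =>
      if (j : Int) ≠ (i : Int) then row ++ ["0"]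
      else row ++ ["D" ++ PySem.Int.toStr ((i : Int) + 1) ++ PySem.Int.toStr ((j : Int) + 1)]) []
    = pvRowP N i := by
  have h :
      (List.range N).foldl (fun (row : List String) (j : Nat) =>
        if (j : Int) ≠ (i : Int) then row ++ ["0"]
        else row ++ ["D" ++ PySem.Int.toStr ((i : Int) + 1) ++ PySem.Int.toStr ((j : Int) + 1)]) []
      = [] ++ (List.range N).map (fun j => if j = i then pvDiag i else "0") := by
    rw [show (fun (row : List String) (j : Nat) =>
        if (j : Int) ≠ (i : Int) then row ++ ["0"]
        else row ++ ["D" ++ PySem.Int.toStr ((i : Int) + 1) ++ PySem.Int.toStr ((j : Int) + 1)])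
      = (fun row j => row ++ [if j = i then pvDiag i else "0"]) from ?_]
    · exact PySem.List.foldl_append_singleton_eq_map _ _ _
    · funext row j
      by_cases hji : j = i
      · subst hji; simp [pvDiag]
      · simp [hji]
  rw [h, List.nil_append]
  apply List.ext_getElem
  · simp [pvRowP]
  · intro k hk1 hk2
    simp only [List.getElem_map, List.getElem_range, pvRowP, List.getElem_set,
      List.getElem_replicate]
    rcases eq_or_ne i k with hik | hik
    · simp [hik]
    · simp [hik, Ne.symm hik]

-- setting cell r*N + j of a flat buffer of uniform-length-N rows patches cell j of row r
lemma flatten_set {α : Type} (N : Nat) (L : List (List α)) (hL : ∀ l ∈ L, l.length = N)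
    (r j : Nat) (hj : j < N) (v : α) :
    L.flatten.set (r * N + j) v = (L.modify r (fun row => row.set j v)).flatten := by
  induction L generalizing r with
  | nil => simp
  | cons a t ih =>
    have ha : a.length = N := hL a (by simp)
    cases r with
    | zero =>
      rw [List.flatten_cons, Nat.zero_mul, Nat.zero_add,
        List.set_append_left _ _ (by omega), List.modify_zero_cons, List.flatten_cons]
    | succ r =>
      rw [List.flatten_cons,
        List.set_append_right _ _ (by rw [ha, Nat.succ_mul]; omega : a.length ≤ (r+1)*N + j),
        show (r+1)*N + j - a.length = r*N + j from by rw [ha, Nat.succ_mul]; omega,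
        ih (fun l hl => hL l (by simp [hl])) r,
        List.modify_succ_cons, List.flatten_cons]

-- B's flat fold is the flatten of the row-wise patched matrix
lemma b_flat (N : Nat) : ∀ (k : Nat), k ≤ N →
    (List.range k).foldl (fun (f : List String) (i : Nat) => f.set (i * (N + 1)) (pvDiag i))
      (List.replicate (N * N) "0")
    = ((List.range N).map (fun i => if i < k then pvRowP N i else List.replicate N "0")).flatten := by
  intro k hk
  induction k with
  | zero =>
    simp only [List.range_zero, List.foldl_nil, Nat.not_lt_zero, if_false]
    rw [List.map_const', List.length_range, List.flatten_replicate_replicate, Nat.mul_comm]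
  | succ k ih =>
    rw [List.range_succ, List.foldl_append, ih (by omega)]
    simp only [List.foldl_cons, List.foldl_nil]
    have hlen : ∀ l ∈ (List.range N).map
        (fun i => if i < k then pvRowP N i else List.replicate N "0"), l.length = N := by
      intro l hl
      obtain ⟨i, _, rfl⟩ := List.mem_map.mp hl
      split <;> simp [pvRowP]
    have hkN : k < N := by omega
    have hpos : k * (N + 1) = k * N + k := by ring
    rw [hpos, flatten_set N _ hlen k k hkN]
    congr 1
    apply List.ext_getElem
    · simp
    · intro t ht1 ht2
      have htN : t < N := by simpa using ht1
      rw [List.getElem_modify]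
      simp only [List.getElem_map, List.getElem_range]
      rcases eq_or_ne k t with hkt | hkt
      · subst hkt
        simp [pvRowP]
      · have hiff : (t < k) = (t < k + 1) := by
          apply propext; constructor <;> intro <;> omega
        simp [hkt, hiff]

-- dropping k*N whole rows of a uniform flatten drops k rows
lemma flatten_drop {α : Type} (N : Nat) : ∀ (L : List (List α)), (∀ l ∈ L, l.length = N) →
    ∀ (k : Nat), L.flatten.drop (k * N) = (L.drop k).flatten := by
  intro L hL k
  induction k generalizing L with
  | zero => simp
  | succ k ih =>
    cases L with
    | nil => simp
    | cons a t =>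
      have ha : a.length = N := hL a (by simp)
      rw [List.flatten_cons, show (k+1)*N = a.length + k*N by rw [ha, Nat.succ_mul]; omega,
        List.drop_length_add_append, List.drop_succ_cons,
        ih t (fun l hl => hL l (by simp [hl]))]

theorem makeDiagonal_eq (n : Int) : makeDiagonal n = makeDiagonal_alt n := by
  unfold makeDiagonal makeDiagonal_alt
  rcases (by omega : n ≤ 0 ∨ 0 < n) with hn0 | hn0
  · simp only [PySem.List.pyRange_one_eq_nil hn0, List.foldl_nil, if_pos hn0]
  rw [if_neg (by omega), PySem.List.pyRange_one]
  simp only [zero_add, sub_zero, List.foldl_map, List.map_map]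
  set N := n.toNat with hN
  -- A's side: the map of patched rows
  have hA : (List.range N).foldl (fun (matrix : List (List String)) (i : Nat) =>
        matrix ++ [(List.range N).foldl (fun (row : List String) (j : Nat) =>
          if (j : Int) ≠ (i : Int) then row ++ ["0"]
          else row ++ ["D" ++ PySem.Int.toStr ((i : Int) + 1) ++ PySem.Int.toStr ((j : Int) + 1)]) []]) []
      = (List.range N).map (fun i => pvRowP N i) := by
    rw [PySem.List.foldl_append_singleton_eq_map]
    simp only [List.nil_append]
    exact List.map_congr_left (fun i _ => a_inner N i)
  rw [hA]
  -- B's flat buffer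
  have hNN : (n * n).toNat = N * N := by
    rw [hN, ← Int.toNat_mul (by omega) (by omega)]
  have hflat : (List.range N).foldl (fun (f : List String) (i : Nat) =>
        f.set ((i : Int) * (n + 1)).toNat
          ("D" ++ PySem.Int.toStr ((i : Int) + 1) ++ PySem.Int.toStr ((i : Int) + 1)))
        (List.replicate (n * n).toNat "0")
      = ((List.range N).map (fun i => pvRowP N i)).flatten := by
    have hidx : ∀ i ∈ List.range N, ((i : Int) * (n + 1)).toNat = i * (N + 1) := by
      intro i hi
      have hiN : i < N := List.mem_range.mp hi
      have hn : n = (N : Int) := by omega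
      rw [hn]
      rw [show ((i : Int) * ((N : Int) + 1)) = ((i * (N + 1) : Nat) : Int) by push_cast; ring]
      exact Int.toNat_natCast _
    rw [hNN]
    calc (List.range N).foldl (fun (f : List String) (i : Nat) =>
          f.set ((i : Int) * (n + 1)).toNat
            ("D" ++ PySem.Int.toStr ((i : Int) + 1) ++ PySem.Int.toStr ((i : Int) + 1)))
          (List.replicate (N * N) "0")
        = (List.range N).foldl (fun (f : List String) (i : Nat) =>
            f.set (i * (N + 1)) (pvDiag i)) (List.replicate (N * N) "0") := by
          apply PySem.List.foldl_congr_mem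
          intro f i hi
          rw [hidx i hi]; rfl
      _ = ((List.range N).map (fun i => if i < N then pvRowP N i else List.replicate N "0")).flatten :=
          b_flat N N (Nat.le_refl _)
      _ = ((List.range N).map (fun i => pvRowP N i)).flatten := by
          congr 1
          apply List.map_congr_left
          intro i hi
          simp [List.mem_range.mp hi]
  rw [hflat]
  -- B's chunking: slice row r back out of the flatten
  apply List.ext_getElem
  · simp
  · intro r hr1 hr2
    have hrN : r < N := by simpa using hr1
    simp only [List.getElem_map, List.getElem_range, Function.comp_apply]
    have hb1 : ((r : Int) * n) = (((r * N : Nat)) : Int) := by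
      have hn : n = (N : Int) := by omega
      rw [hn]; push_cast; ring
    have hb2 : (((r : Int) + 1) * n) = (((r * N : Nat) : Int) + ((N : Nat) : Int)) := by
      have hn : n = (N : Int) := by omega
      rw [hn]; push_cast; ring
    rw [hb1, hb2, PySem.List.slice_natCast_add]
    have hlenrows : ∀ l ∈ (List.range N).map (fun i => pvRowP N i), l.length = N := by
      intro l hl
      obtain ⟨i, _, rfl⟩ := List.mem_map.mp hl
      exact pvRowP_length N i
    rw [flatten_drop N _ hlenrows r]
    rw [← List.map_drop, List.range_eq_range', List.drop_range']
    simp only [Nat.zero_add, Nat.mul_one]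
    obtain ⟨m, hm⟩ : ∃ m, N - r = m + 1 := ⟨N - r - 1, by omega⟩
    rw [hm, List.range'_succ, List.map_cons, List.flatten_cons,
      List.take_left' (pvRowP_length N r)]

-- ===== VERDICT (by name: the statement is the Claim_ definition above) =====
theorem makeDiagonal_spec : Claim_equal_makeDiagonal := by
  intro n _
  exact makeDiagonal_eq n
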